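-- pv_equiv track=rewrite | github.com/akochergina/rna-folding | modules/rna_structure.py | rna_structure_projection
-- ===== SOURCE A (Python) =====
-- def parse_rna_structure(dot_bracket:str) -> list:
--     """
--     Parse RNA structure from dot bracket notation
--
--     Args:
--         dot_bracket: Dot bracket notation of the RNA structure
--
--     Returns:
--         List of base pairs
--
--     Example:
--         parse_rna_structure('.((...))(...)') -> [(2, 8), (3, 7), (9, 13)]
--     """
--     stack = []
--     base_pairs = []
--     for i, c in enumerate(dot_bracket):
--         if c == '(':
--             stack.append(i+1)
--         elif c == ')':
--             assert len(stack) > 0, "Unmatched brackets )"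
--             base_pairs.append((stack.pop(), i+1))
--     base_pairs = sorted(base_pairs, key=lambda x: x[0])
--     assert len(stack) == 0, "Unmatched brackets ("
--     return base_pairs
--
-- def rna_structure_projection(aligned_sequence, dot_bracket_structure):
--     """
--     Perform RNA structure projection. The projected structure does not contain any base pair that involved gaps in the alignment string.
--
--     Args:
--         aligned_sequence: RNA sequence
--         dot_bracket_structure: RNA structure in dot-bracket notation
--
--     Returns:
--         (sequence, projected_structure): Tuple of RNA sequence and projected structure
--
--     Example:
--         rna_structure_projection('GCC-CUUAG-U-GAAUCCAGC', '((.((...))(((...)))))') == ('GCCCUUAGUGAAUCCAGC', '((.(...)((...).)))')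
--     """
--     assert len(aligned_sequence) == len(dot_bracket_structure), "Sequences must have the same length"
--     edges = parse_rna_structure(dot_bracket_structure)
--     sequence = []
--     projected_structure = []
--     to_convert = [] # if first bracket is deleted, we need to delete the second bracket as well, so to convert second one in a dot
--     for i, (s, b) in enumerate(zip(aligned_sequence, dot_bracket_structure)):
--         if i in to_convert:
--             if b == ')':
--                 b = '.'
--             to_convert.remove(i)
--         if s == '-':
--             if b == '(':
--                 # we need to find in edges if there is a pair with i
--                 found = False
--                 for edge in edges:
--                     if edge[0] == i+1:
--                         found = True
--                         break
--                 if found: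
--                     to_convert.append(edge[1]-1)
--         else:
--             sequence.append(s)
--             projected_structure.append(b)
--     return ''.join(sequence), ''.join(projected_structure)
-- ===== SOURCE B (Python) =====
-- def rna_structure_projection(aligned_sequence, dot_bracket_structure):
--     assert len(aligned_sequence) == len(dot_bracket_structure), "Sequences must have the same length"
--     # single stack pass: remember for each '(' whether it sits on a gap;
--     # a ')' whose partner was gapped is recorded for conversion to '.'
--     stack = []
--     gapped = set()
--     for i, (s, c) in enumerate(zip(aligned_sequence, dot_bracket_structure)):
--         if c == '(':
--             stack.append(s == '-')
--         elif c == ')':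
--             assert stack, "Unmatched brackets )"
--             if stack.pop():
--                 gapped.add(i)
--     assert not stack, "Unmatched brackets ("
--     sequence = ''.join(s for s in aligned_sequence if s != '-')
--     projected = ''.join('.' if i in gapped else c
--                         for i, (s, c) in enumerate(zip(aligned_sequence, dot_bracket_structure))
--                         if s != '-')
--     return sequence, projected
-- ===== Notes on version B (the rewrite author's own statement) =====
-- stated objective: alternative
-- what changed: B replaces A's parse-all-edges pass (with a sort, a per-'(' linear scan of the edge list and a mutable to_convert list scanned per position) by a single stack pass that records directly which ')' positions close a gapped '(', followed by simple filtering comprehensions.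
import Mathlib
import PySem

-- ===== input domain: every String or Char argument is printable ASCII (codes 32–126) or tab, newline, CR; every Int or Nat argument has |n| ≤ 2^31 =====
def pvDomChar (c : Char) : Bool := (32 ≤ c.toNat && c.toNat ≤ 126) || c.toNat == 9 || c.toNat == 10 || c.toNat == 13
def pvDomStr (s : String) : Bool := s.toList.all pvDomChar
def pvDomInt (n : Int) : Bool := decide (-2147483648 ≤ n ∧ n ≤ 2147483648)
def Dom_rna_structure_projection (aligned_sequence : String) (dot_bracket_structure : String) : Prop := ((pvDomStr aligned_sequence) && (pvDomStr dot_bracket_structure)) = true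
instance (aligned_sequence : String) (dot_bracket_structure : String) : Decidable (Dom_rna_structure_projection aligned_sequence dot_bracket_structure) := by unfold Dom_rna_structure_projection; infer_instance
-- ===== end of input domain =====

-- B replaces A's edge-list pass (sort + per-'(' linear scan + mutable to_convert list) by a
-- single stack pass recording which ')' close a gapped '(' ; equivalence of return values is
-- proved on length-matched, balanced structures (elsewhere the Python A raises AssertionError).

-- ===== PORT A =====
-- parse_rna_structure: stack/base_pairs loop over enumerate(dot_bracket)
def pvParseLoop : List (Int × Char) → List Int → List (Int × Int) → List Int × List (Int × Int)
  | [], stack, pairs => (stack, pairs)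
  | (i, c) :: t, stack, pairs =>
    if c = '(' then pvParseLoop t ((i + 1) :: stack) pairs
    else if c = ')' then
      match stack with
      | p :: st => pvParseLoop t st (pairs ++ [(p, i + 1)])
      | [] => pvParseLoop t [] pairs          -- Python: AssertionError (outside Pre_)
    else pvParseLoop t stack pairs

def parse_rna_structure (dot_bracket : String) : List (Int × Int) :=
  let r := pvParseLoop (PySem.List.enumerate dot_bracket.toList) [] []
  PySem.List.sorted r.2 (fun x => x.1) false

-- main loop of A over enumerate(zip(aligned, structure)) with the to_convert list
def pvLoopA (edges : List (Int × Int)) :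
    List (Int × (Char × Char)) → List Int → List Char → List Char → List Char × List Char
  | [], _, seq, proj => (seq, proj)
  | (i, (s, b)) :: t, tc, seq, proj =>
    let b' := if i ∈ tc then (if b = ')' then '.' else b) else b
    let tc' := if i ∈ tc then tc.erase i else tc
    if s = '-' then
      if b' = '(' then
        match edges.find? (fun e => decide (e.1 = i + 1)) with
        | some e => pvLoopA edges t (tc' ++ [e.2 - 1]) seq proj
        | none => pvLoopA edges t tc' seq proj
      else pvLoopA edges t tc' seq proj
    else pvLoopA edges t tc' (seq ++ [s]) (proj ++ [b'])

def rna_structure_projection (aligned_sequence : String) (dot_bracket_structure : String) : String × String :=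
  let edges := parse_rna_structure dot_bracket_structure
  let r := pvLoopA edges
      (PySem.List.enumerate (aligned_sequence.toList.zip dot_bracket_structure.toList)) [] [] []
  (String.ofList r.1, String.ofList r.2)

-- ===== PORT B =====
-- one stack pass: push "is this '(' on a gap", record ')' positions whose partner was gapped
def pvPass1 : List (Int × (Char × Char)) → List Bool → PySem.Set Int → PySem.Set Int
  | [], _, g => g
  | (i, (s, c)) :: t, stack, g =>
    if c = '(' then pvPass1 t (decide (s = '-') :: stack) g
    else if c = ')' then
      match stack with
      | f :: st => pvPass1 t st (if f then PySem.Set.add g i else g)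
      | [] => pvPass1 t [] g                  -- Python: AssertionError (outside Pre_)
    else pvPass1 t stack g

def rna_structure_projection_alt (aligned_sequence : String) (dot_bracket_structure : String) : String × String :=
  let l := aligned_sequence.toList.zip dot_bracket_structure.toList
  let g := pvPass1 (PySem.List.enumerate l) [] PySem.Set.empty
  let seq := aligned_sequence.toList.filter (fun s => decide (s ≠ '-'))
  let proj := (PySem.List.enumerate l).filterMap
      (fun p => if p.2.1 ≠ '-' then some (if p.1 ∈ g then '.' else p.2.2) else none)
  (String.ofList seq, String.ofList proj)

-- ===== PRECONDITION & SPEC =====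
-- Pre_ = the inputs where Python A returns: equal lengths and a balanced bracket structure
-- (elsewhere one of A's asserts raises AssertionError); stated by prefix bracket counts.
def Pre_rna_structure_projection (aligned_sequence : String) (dot_bracket_structure : String) : Prop :=
  aligned_sequence.toList.length = dot_bracket_structure.toList.length ∧
  dot_bracket_structure.toList.count '(' = dot_bracket_structure.toList.count ')' ∧
  ∀ n ∈ List.range (dot_bracket_structure.toList.length + 1),
    (dot_bracket_structure.toList.take n).count ')' ≤ (dot_bracket_structure.toList.take n).count '('

instance (aligned_sequence : String) (dot_bracket_structure : String) :
    Decidable (Pre_rna_structure_projection aligned_sequence dot_bracket_structure) := by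
  unfold Pre_rna_structure_projection; infer_instance

def pvWitness_rna_structure_projection : String × String := ("GC-AU", "(()).")

def Spec_rna_structure_projection (aligned_sequence : String) (dot_bracket_structure : String) (out : String × String) : Prop := out = rna_structure_projection_alt aligned_sequence dot_bracket_structure
instance (aligned_sequence : String) (dot_bracket_structure : String) (out : String × String) : Decidable (Spec_rna_structure_projection aligned_sequence dot_bracket_structure out) := by unfold Spec_rna_structure_projection; infer_instance

-- ===== CLAIM (what is proved, stated in full; the proofs are below) =====
def Claim_equal_rna_structure_projection : Prop := ∀ (aligned_sequence : String) (dot_bracket_structure : String), Dom_rna_structure_projection aligned_sequence dot_bracket_structure → Pre_rna_structure_projection aligned_sequence dot_bracket_structure → Spec_rna_structure_projection aligned_sequence dot_bracket_structure (rna_structure_projection aligned_sequence dot_bracket_structure)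

-- ===== LEMMAS AND PROOFS =====

-- depth-scan balancedness (reference notion used by the proofs)
def pvWf : List Char → Nat → Bool
  | [], d => d == 0
  | c :: t, d =>
    if c = ')' then (match d with | 0 => false | e + 1 => pvWf t e)
    else if c = '(' then pvWf t (d + 1)
    else pvWf t d

-- index where the d-th enclosing open bracket (0 = innermost) gets closed
def pvClosePos : List Char → Int → Nat → Option Int
  | [], _, _ => none
  | c :: t, i, d =>
    if c = ')' then (match d with | 0 => some i | e + 1 => pvClosePos t (i + 1) e)
    else if c = '(' then pvClosePos t (i + 1) (d + 1)
    else pvClosePos t (i + 1) d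

-- the pairs still to be emitted by A's parse loop
def pvRunPairs : List Char → Int → List Int → List (Int × Int)
  | [], _, _ => []
  | c :: t, i, stack =>
    if c = ')' then
      match stack with
      | p :: st => (p, i + 1) :: pvRunPairs t (i + 1) st
      | [] => pvRunPairs t (i + 1) []
    else if c = '(' then pvRunPairs t (i + 1) ((i + 1) :: stack)
    else pvRunPairs t (i + 1) stack

-- reference single-pass projection (chars of the projected structure)
def pvLoopB : List (Char × Char) → List Bool → List Char
  | [], _ => []
  | (s, c) :: t, stk =>
    if c = ')' then
      match stk with
      | f :: st => (if s = '-' then [] else [if f then '.' else ')']) ++ pvLoopB t st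
      | [] => (if s = '-' then [] else [')']) ++ pvLoopB t []
    else if c = '(' then (if s = '-' then [] else ['(']) ++ pvLoopB t (decide (s = '-') :: stk)
    else (if s = '-' then [] else [c]) ++ pvLoopB t stk

def pvTcOf (stk : List (Bool × Int)) : List Int :=
  stk.reverse.filterMap (fun p => if p.1 then some p.2 else none)

theorem pvFind?_unique {α : Type} (p : α → Bool) (xs : List α) (e : α)
    (hm : e ∈ xs) (hp : p e = true) (hu : ∀ x ∈ xs, p x = true → x = e) :
    xs.find? p = some e := by
  induction xs with
  | nil => cases hm
  | cons x t ih =>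
    by_cases hx : p x = true
    · rw [List.find?_cons_of_pos hx]
      have := hu x (List.mem_cons_self) hx
      rw [this]
    · rw [List.find?_cons_of_neg (by simpa using hx)]
      rcases List.mem_cons.1 hm with h | h
      · exact absurd (h ▸ hp) hx
      · exact ih h (fun y hy hpy => hu y (List.mem_cons_of_mem _ hy) hpy)

theorem pvClosePos_ge {bs : List Char} {i j : Int} {d : Nat}
    (h : pvClosePos bs i d = some j) : i ≤ j := by
  induction bs generalizing i d with
  | nil => simp [pvClosePos] at h
  | cons c t ih =>
    simp only [pvClosePos] at h
    split at h
    · match d, h with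
      | 0, h => simp_all
      | e + 1, h => have := ih h; omega
    · split at h
      · have := ih h; omega
      · have := ih h; omega

theorem pvWf_closePos {bs : List Char} {d' : Nat} (h : pvWf bs d' = true)
    (i : Int) {d : Nat} (hd : d < d') : ∃ cl, pvClosePos bs i d = some cl := by
  induction bs generalizing i d d' with
  | nil => simp [pvWf] at h; omega
  | cons c t ih =>
    by_cases h1 : c = ')'
    · subst h1
      simp only [pvWf, reduceIte] at h
      cases d' with
      | zero => simp at h
      | succ e =>
        cases d with
        | zero => exact ⟨i, by simp [pvClosePos]⟩
        | succ f =>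
          obtain ⟨cl, hcl⟩ := ih h (i + 1) (d := f) (by omega)
          exact ⟨cl, by simp [pvClosePos, hcl]⟩
    · by_cases h2 : c = '('
      · subst h2
        simp only [pvWf, reduceIte] at h
        obtain ⟨cl, hcl⟩ := ih h (i + 1) (d := d + 1) (by omega)
        exact ⟨cl, by simp [pvClosePos, hcl]⟩
      · simp only [pvWf, if_neg h1, if_neg h2] at h
        obtain ⟨cl, hcl⟩ := ih h (i + 1) hd
        exact ⟨cl, by simp [pvClosePos, hcl, h1, h2]⟩

theorem pvParseLoop_pairs (bs : List Char) (i : Int) (stack : List Int) (pairs : List (Int × Int)) :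
    (pvParseLoop (PySem.List.enumerate bs i) stack pairs).2 = pairs ++ pvRunPairs bs i stack := by
  induction bs generalizing i stack pairs with
  | nil => simp [pvParseLoop, pvRunPairs, PySem.List.enumerate]
  | cons c t ih =>
    rw [PySem.List.enumerate_cons]
    by_cases h1 : c = '('
    · simp [pvParseLoop, pvRunPairs, h1, ih]
    · by_cases h2 : c = ')'
      · cases stack with
        | nil => simp [pvParseLoop, pvRunPairs, h1, h2, ih]
        | cons p st => simp [pvParseLoop, pvRunPairs, h1, h2, ih]
      · simp [pvParseLoop, pvRunPairs, h1, h2, ih]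

theorem pvRunPairs_fst {bs : List Char} {i : Int} {stack : List Int} {e : Int × Int}
    (h : e ∈ pvRunPairs bs i stack) : e.1 ∈ stack ∨ i + 1 ≤ e.1 := by
  induction bs generalizing i stack with
  | nil => simp [pvRunPairs] at h
  | cons c t ih =>
    simp only [pvRunPairs] at h
    split at h
    · match stack, h with
      | p :: st, h =>
        rcases List.mem_cons.1 h with h | h
        · subst h; exact Or.inl List.mem_cons_self
        · rcases ih h with h | h
          · exact Or.inl (List.mem_cons_of_mem _ h)
          · right; omega
      | [], h =>
        rcases ih h with h | h
        · simp at h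
        · right; omega
    · split at h
      · rcases ih h with h | h
        · rcases List.mem_cons.1 h with h | h
          · right; omega
          · exact Or.inl h
        · right; omega
      · rcases ih h with h | h
        · exact Or.inl h
        · right; omega

theorem pvRunPairs_close {bs : List Char} {i cl : Int} {d : Nat} {stack : List Int}
    (hc : pvClosePos bs i d = some cl) (hd : d < stack.length) :
    (stack[d], cl + 1) ∈ pvRunPairs bs i stack := by
  induction bs generalizing i d stack with
  | nil => simp [pvClosePos] at hc
  | cons c t ih =>
    simp only [pvClosePos] at hc
    simp only [pvRunPairs]
    split at hc
    · rename_i h1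
      simp only [h1, if_pos rfl]
      match stack, d, hc with
      | p :: st, 0, hc =>
        simp only [Option.some.injEq] at hc
        subst hc
        exact List.mem_cons_self
      | p :: st, e + 1, hc =>
        simp only [List.getElem_cons_succ]
        exact List.mem_cons_of_mem _ (ih hc (by simpa using hd))
    · rename_i h1
      split at hc
      · rename_i h2
        simp only [h2, if_pos rfl, if_neg h1]
        have := ih (stack := (i + 1) :: stack) hc (by simp only [List.length_cons]; omega)
        simpa using this
      · rename_i h2
        simp only [if_neg h1, if_neg h2]
        exact ih hc hd

theorem pvRunPairs_uniq {bs : List Char} {i : Int} {stack : List Int}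
    (hle : ∀ p ∈ stack, p ≤ i) (hnd : stack.Nodup) :
    ∀ x ∈ pvRunPairs bs i stack, ∀ y ∈ pvRunPairs bs i stack, x.1 = y.1 → x = y := by
  induction bs generalizing i stack with
  | nil => intro x hx; simp [pvRunPairs] at hx
  | cons c t ih =>
    intro x hx y hy hxy
    by_cases h1 : c = ')'
    · subst h1
      simp only [pvRunPairs, reduceIte] at hx hy
      match stack, hle, hnd, hx, hy with
      | p :: st, hle, hnd, hx, hy =>
        have hp : p ≤ i := hle p List.mem_cons_self
        have hst : ∀ q ∈ st, q ≤ i + 1 := fun q hq => by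
          have := hle q (List.mem_cons_of_mem _ hq); omega
        have hpn : p ∉ st := (List.nodup_cons.1 hnd).1
        rcases List.mem_cons.1 hx with hx | hx <;> rcases List.mem_cons.1 hy with hy | hy
        · rw [hx, hy]
        · exfalso
          subst hx
          rcases pvRunPairs_fst hy with h | h
          · exact hpn (by rw [← hxy] at h; exact h)
          · omega
        · exfalso
          subst hy
          rcases pvRunPairs_fst hx with h | h
          · exact hpn (by rw [hxy] at h; exact h)
          · omega
        · exact ih hst (List.nodup_cons.1 hnd).2 x hx y hy hxy
      | [], hle, hnd, hx, hy =>
        exact ih (by simp) (by simp) x hx y hy hxy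
    · by_cases h2 : c = '('
      · subst h2
        simp only [pvRunPairs, reduceIte] at hx hy
        refine ih ?_ ?_ x hx y hy hxy
        · intro q hq
          rcases List.mem_cons.1 hq with h | h
          · omega
          · have := hle q h; omega
        · refine List.nodup_cons.2 ⟨fun hmem => ?_, hnd⟩
          have := hle _ hmem; omega
      · simp only [pvRunPairs, if_neg h1, if_neg h2] at hx hy
        exact ih (fun q hq => by have := hle q hq; omega) hnd x hx y hy hxy

theorem pvOpen_pair {bs : List Char} {k : Nat} (i : Int) {stack : List Int}
    (hw : pvWf bs stack.length = true) (hk : k < bs.length) (hc : bs[k] = '(') :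
    ∃ cl, pvClosePos (bs.drop (k + 1)) (i + k + 1) 0 = some cl ∧
      (i + k + 1, cl + 1) ∈ pvRunPairs bs i stack := by
  induction bs generalizing i k stack with
  | nil => simp at hk
  | cons c t ih =>
    cases k with
    | zero =>
      have hc0 : c = '(' := by simpa using hc
      subst hc0
      simp only [pvWf, reduceIte] at hw
      obtain ⟨cl, hcl⟩ := pvWf_closePos hw (i + 1) (d := 0) (by omega)
      refine ⟨cl, ?_, ?_⟩
      · simpa using hcl
      · have hd0 : 0 < ((i + 1) :: stack).length := by simp
        have := pvRunPairs_close (stack := (i + 1) :: stack) hcl hd0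
        simp only [pvRunPairs, reduceIte]
        simpa using this
    | succ m =>
      have hkm : m < t.length := by simpa using hk
      have hc' : t[m]'hkm = '(' := by simpa using hc
      have heq : (i + (((m : Nat) + 1 : Nat) : Int) + 1 : Int) = i + 1 + (m : Int) + 1 := by
        push_cast; ring
      by_cases h1 : c = ')'
      · subst h1
        simp only [pvWf, reduceIte] at hw
        match stack, hw with
        | p :: st, hw =>
          obtain ⟨cl, hcl, hmem⟩ := ih (i + 1) (stack := st) hw hkm hc'
          refine ⟨cl, ?_, ?_⟩
          · rw [heq]; simpa using hcl
          · simp only [pvRunPairs, reduceIte, heq]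
            exact List.mem_cons_of_mem _ hmem
      · by_cases h2 : c = '('
        · subst h2
          simp only [pvWf, reduceIte] at hw
          obtain ⟨cl, hcl, hmem⟩ := ih (i + 1) (stack := (i + 1) :: stack) (by simpa using hw) hkm hc'
          refine ⟨cl, ?_, ?_⟩
          · rw [heq]; simpa using hcl
          · simp only [pvRunPairs, reduceIte, heq]
            exact hmem
        · simp only [pvWf, if_neg h1, if_neg h2] at hw
          obtain ⟨cl, hcl, hmem⟩ := ih (i + 1) (stack := stack) hw hkm hc'
          refine ⟨cl, ?_, ?_⟩
          · rw [heq]; simpa using hcl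
          · simp only [pvRunPairs, if_neg h1, if_neg h2, heq]
            exact hmem

theorem pvPass1_ge {t : List (Char × Char)} {i j : Int} {stk : List Bool} {g : PySem.Set Int}
    (h : j ∈ pvPass1 (PySem.List.enumerate t i) stk g) : j ∈ g ∨ i ≤ j := by
  induction t generalizing i stk g with
  | nil => simp [pvPass1, PySem.List.enumerate] at h; exact Or.inl h
  | cons p t ih =>
    obtain ⟨s, c⟩ := p
    rw [PySem.List.enumerate_cons] at h
    simp only [pvPass1] at h
    split at h
    · rcases ih h with h | h
      · exact Or.inl h
      · right; omega
    · split at h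
      · match stk, h with
        | f :: st, h =>
          rcases ih h with h | h
          · by_cases hf : f = true
            · rw [if_pos hf] at h
              rcases (PySem.Set.mem_add g i j).1 h with h | h
              · exact Or.inl h
              · right; omega
            · rw [if_neg hf] at h; exact Or.inl h
          · right; omega
        | [], h =>
          rcases ih h with h | h
          · exact Or.inl h
          · right; omega
      · rcases ih h with h | h
        · exact Or.inl h
        · right; omega

theorem pvPass1_mono {t : List (Char × Char)} {i j : Int} {stk : List Bool} {g : PySem.Set Int}
    (h : j ∈ g) : j ∈ pvPass1 (PySem.List.enumerate t i) stk g := by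
  induction t generalizing i stk g with
  | nil => simpa [pvPass1, PySem.List.enumerate] using h
  | cons p t ih =>
    obtain ⟨s, c⟩ := p
    rw [PySem.List.enumerate_cons]
    simp only [pvPass1]
    split
    · exact ih h
    · split
      · match stk with
        | f :: st =>
          refine ih ?_
          by_cases hf : f = true
          · rw [if_pos hf]; exact (PySem.Set.mem_add g i j).2 (Or.inl h)
          · rw [if_neg hf]; exact h
        | [] => exact ih h
      · exact ih h

theorem pvPass1_cons_open (i : Int) (s : Char) (r : List (Int × (Char × Char))) (stk : List Bool) (g : PySem.Set Int) :
    pvPass1 ((i, (s, '(')) :: r) stk g = pvPass1 r (decide (s = '-') :: stk) g := rfl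

theorem pvPass1_cons_close (i : Int) (s : Char) (r : List (Int × (Char × Char))) (f : Bool) (st : List Bool) (g : PySem.Set Int) :
    pvPass1 ((i, (s, ')')) :: r) (f :: st) g = pvPass1 r st (if f then PySem.Set.add g i else g) := rfl

theorem pvPass1_cons_close_nil (i : Int) (s : Char) (r : List (Int × (Char × Char))) (g : PySem.Set Int) :
    pvPass1 ((i, (s, ')')) :: r) [] g = pvPass1 r [] g := rfl

theorem pvPass1_cons_other (i : Int) (s c : Char) (r : List (Int × (Char × Char))) (stk : List Bool) (g : PySem.Set Int)
    (h1 : ¬ c = ')') (h2 : ¬ c = '(') :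
    pvPass1 ((i, (s, c)) :: r) stk g = pvPass1 r stk g := by
  simp [pvPass1, h1, h2]

theorem pvLoopB_cons_close (s : Char) (t : List (Char × Char)) (f : Bool) (st : List Bool) :
    pvLoopB ((s, ')') :: t) (f :: st) = (if s = '-' then [] else [if f then '.' else ')']) ++ pvLoopB t st := rfl

theorem pvLoopB_cons_close_nil (s : Char) (t : List (Char × Char)) :
    pvLoopB ((s, ')') :: t) [] = (if s = '-' then [] else [')']) ++ pvLoopB t [] := rfl

theorem pvLoopB_cons_open (s : Char) (t : List (Char × Char)) (stk : List Bool) :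
    pvLoopB ((s, '(') :: t) stk = (if s = '-' then [] else ['(']) ++ pvLoopB t (decide (s = '-') :: stk) := rfl

theorem pvLoopB_cons_other (s c : Char) (t : List (Char × Char)) (stk : List Bool)
    (h1 : ¬ c = ')') (h2 : ¬ c = '(') :
    pvLoopB ((s, c) :: t) stk = (if s = '-' then [] else [c]) ++ pvLoopB t stk := by
  simp [pvLoopB, h1, h2]

-- B's filtered comprehension over the final set = the reference single pass
theorem pvB_eq_loopB (t : List (Char × Char)) (i : Int) (stk : List Bool) (g : PySem.Set Int)
    (hg : ∀ j ∈ g, j < i) :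
    (PySem.List.enumerate t i).filterMap
        (fun p => if p.2.1 ≠ '-' then
            some (if p.1 ∈ pvPass1 (PySem.List.enumerate t i) stk g then '.' else p.2.2)
          else none)
      = pvLoopB t stk := by
  induction t generalizing i stk g with
  | nil => simp [pvLoopB, PySem.List.enumerate]
  | cons p t ih =>
    obtain ⟨s, c⟩ := p
    rw [PySem.List.enumerate_cons]
    have hg1 : ∀ j ∈ g, j < i + 1 := fun j hj => by have := hg j hj; omega
    by_cases h1 : c = ')'
    · subst h1
      match stk with
      | f :: st =>
        rw [pvPass1_cons_close, pvLoopB_cons_close, List.filterMap_cons]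
        have hg' : ∀ j ∈ (if f = true then PySem.Set.add g i else g), j < i + 1 := by
          intro j hj
          by_cases hf : f = true
          · rw [if_pos hf] at hj
            rcases (PySem.Set.mem_add g i j).1 hj with h | h
            · have := hg j h; omega
            · omega
          · rw [if_neg hf] at hj; have := hg j hj; omega
        rw [ih (i + 1) st _ hg']
        have hmem : (i ∈ pvPass1 (PySem.List.enumerate t (i + 1)) st
            (if f = true then PySem.Set.add g i else g)) ↔ f = true := by
          constructor
          · intro hm
            by_contra hf
            rw [if_neg hf] at hm
            rcases pvPass1_ge hm with h | h
            · have := hg i h; omega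
            · omega
          · intro hf
            rw [if_pos hf]
            exact pvPass1_mono ((PySem.Set.mem_add g i i).2 (Or.inr rfl))
        by_cases hs : s = '-'
        · simp [hs]
        · by_cases hf : f = true
          · have hm := hmem.2 hf
            rw [if_pos hf] at hm
            simp [hs, hf, hm]
          · have hni : ¬ (i ∈ pvPass1 (PySem.List.enumerate t (i + 1)) st
                (if f = true then PySem.Set.add g i else g)) := fun hm => hf (hmem.1 hm)
            rw [if_neg hf] at hni
            simp [hs, hf, hni]
      | [] =>
        rw [pvPass1_cons_close_nil, pvLoopB_cons_close_nil, List.filterMap_cons]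
        rw [ih (i + 1) [] g hg1]
        have hni : ¬ (i ∈ pvPass1 (PySem.List.enumerate t (i + 1)) ([] : List Bool) g) := by
          intro hm
          rcases pvPass1_ge hm with h | h
          · have := hg i h; omega
          · omega
        by_cases hs : s = '-'
        · simp [hs]
        · simp only [hs] at hni ⊢
          simp [hs, hni]
    · by_cases h2 : c = '('
      · subst h2
        rw [pvPass1_cons_open, pvLoopB_cons_open, List.filterMap_cons]
        rw [ih (i + 1) _ g hg1]
        have hni : ¬ (i ∈ pvPass1 (PySem.List.enumerate t (i + 1)) (decide (s = '-') :: stk) g) := by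
          intro hm
          rcases pvPass1_ge hm with h | h
          · have := hg i h; omega
          · omega
        by_cases hs : s = '-'
        · simp [hs]
        · simp only [decide_eq_false hs] at hni
          simp [hs, hni]
      · rw [pvPass1_cons_other i s c _ stk g h1 h2, pvLoopB_cons_other s c t stk h1 h2,
          List.filterMap_cons]
        rw [ih (i + 1) stk g hg1]
        have hni : ¬ (i ∈ pvPass1 (PySem.List.enumerate t (i + 1)) stk g) := by
          intro hm
          rcases pvPass1_ge hm with h | h
          · have := hg i h; omega
          · omega
        by_cases hs : s = '-'
        · simp [hs]
        · simp [hs, hni]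

theorem pvTcOf_cons (p : Bool × Int) (stk : List (Bool × Int)) :
    pvTcOf (p :: stk) = pvTcOf stk ++ (if p.1 then [p.2] else []) := by
  cases hp : p.1 <;> simp [pvTcOf, List.filterMap_append, hp]

theorem mem_pvTcOf {stk : List (Bool × Int)} {j : Int} (h : j ∈ pvTcOf stk) :
    ∃ (d : Nat) (hd : d < stk.length), stk[d] = (true, j) := by
  induction stk with
  | nil => simp [pvTcOf] at h
  | cons p stk ih =>
    rw [pvTcOf_cons] at h
    rcases List.mem_append.1 h with h | h
    · obtain ⟨d, hd, he⟩ := ih h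
      exact ⟨d + 1, by simpa using Nat.succ_lt_succ hd, by simpa using he⟩
    · by_cases hp : p.1 = true
      · rw [if_pos hp] at h
        have hj : j = p.2 := by simpa using h
        exact ⟨0, by simp, by simp [← hj, Prod.ext_iff, hp]⟩
      · rw [if_neg hp] at h; simp at h

theorem pvTcOf_not_mem {stk : List (Bool × Int)} {i : Int}
    (h : ∀ (d : Nat) (hd : d < stk.length), i + 1 ≤ stk[d].2) : i ∉ pvTcOf stk := by
  intro hm
  obtain ⟨d, hd, he⟩ := mem_pvTcOf hm
  have h2 := h d hd
  rw [he] at h2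
  simp at h2

theorem pvLoopA_cons (edges : List (Int × Int)) (i : Int) (s b : Char)
    (r : List (Int × (Char × Char))) (tc : List Int) (seq proj : List Char) :
    pvLoopA edges ((i, (s, b)) :: r) tc seq proj =
      (if s = '-' then
        if (if i ∈ tc then (if b = ')' then '.' else b) else b) = '(' then
          match edges.find? (fun e => decide (e.1 = i + 1)) with
          | some e => pvLoopA edges r ((if i ∈ tc then tc.erase i else tc) ++ [e.2 - 1]) seq proj
          | none => pvLoopA edges r (if i ∈ tc then tc.erase i else tc) seq proj
        else pvLoopA edges r (if i ∈ tc then tc.erase i else tc) seq proj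
      else pvLoopA edges r (if i ∈ tc then tc.erase i else tc) (seq ++ [s])
        (proj ++ [if i ∈ tc then (if b = ')' then '.' else b) else b])) := rfl

theorem pvHe_shift {edges : List (Int × Int)} {s b : Char} {t : List (Char × Char)} {i : Int}
    (he : ∀ (k : Nat) (hk : k < ((s, b) :: t).length), ((((s, b) :: t)[k]).2 = '(') →
      ∃ cl, pvClosePos ((((s, b) :: t).map Prod.snd).drop (k + 1)) (i + k + 1) 0 = some cl ∧
        edges.find? (fun e => decide (e.1 = i + k + 1)) = some (i + k + 1, cl + 1)) :
    ∀ (k : Nat) (hk : k < t.length), ((t[k]).2 = '(') →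
      ∃ cl, pvClosePos ((t.map Prod.snd).drop (k + 1)) ((i + 1) + k + 1) 0 = some cl ∧
        edges.find? (fun e => decide (e.1 = (i + 1) + k + 1)) = some ((i + 1) + k + 1, cl + 1) := by
  intro k hk hck
  have heq : (i + (((k : Nat) + 1 : Nat) : Int) + 1) = (i + 1) + (k : Int) + 1 := by push_cast; ring
  obtain ⟨cl, hcl, hf⟩ := he (k + 1) (by simpa using Nat.succ_lt_succ hk) (by simpa using hck)
  rw [heq] at hcl hf
  exact ⟨cl, by simpa using hcl, hf⟩

-- A's loop with the to_convert list = the reference single pass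
theorem pvA_eq_loopB (edges : List (Int × Int)) (t : List (Char × Char)) (i : Int)
    (stk : List (Bool × Int)) (seq proj : List Char)
    (h1 : ∀ (d : Nat) (hd : d < stk.length), pvClosePos (t.map Prod.snd) i d = some stk[d].2)
    (h2 : pvWf (t.map Prod.snd) stk.length = true)
    (he : ∀ (k : Nat) (hk : k < t.length), (t[k]).2 = '(' →
      ∃ cl, pvClosePos ((t.map Prod.snd).drop (k + 1)) (i + k + 1) 0 = some cl ∧
        edges.find? (fun e => decide (e.1 = i + k + 1)) = some (i + k + 1, cl + 1)) :
    pvLoopA edges (PySem.List.enumerate t i) (pvTcOf stk) seq proj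
      = (seq ++ (t.filter (fun p => decide (p.1 ≠ '-'))).map Prod.fst,
         proj ++ pvLoopB t (stk.map Prod.fst)) := by
  induction t generalizing i stk seq proj with
  | nil => simp [pvLoopA, pvLoopB, PySem.List.enumerate]
  | cons p t ih =>
    obtain ⟨s, b⟩ := p
    rw [PySem.List.enumerate_cons, pvLoopA_cons]
    have hshift := pvHe_shift he
    by_cases hb : b = ')'
    · subst hb
      match stk, h1, h2 with
      | [], h1, h2 => simp [pvWf] at h2
      | (f, cl0) :: stk', h1, h2 =>
        have h2' : pvWf (t.map Prod.snd) stk'.length = true := by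
          simpa [pvWf] using h2
        have hcl0 : i = cl0 := by
          have := h1 0 (by simp)
          simpa [pvClosePos] using this
        subst hcl0
        have h1' : ∀ (d : Nat) (hd : d < stk'.length),
            pvClosePos (t.map Prod.snd) (i + 1) d = some stk'[d].2 := by
          intro d hd
          have := h1 (d + 1) (by simpa using Nat.succ_lt_succ hd)
          simpa [pvClosePos] using this
        have hnm' : i ∉ pvTcOf stk' := pvTcOf_not_mem (fun d hd => by
          have := pvClosePos_ge (h1' d hd); omega)
        by_cases hf : f = true
        · have him : i ∈ pvTcOf ((f, i) :: stk') := by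
            rw [pvTcOf_cons]; simp [hf]
          rw [if_pos him, if_pos him, pvTcOf_cons]
          simp only [hf, reduceIte]
          rw [List.erase_append_right _ hnm', List.erase_cons_head, List.append_nil]
          by_cases hs : s = '-'
          · rw [if_pos hs]
            rw [ih (i + 1) stk' seq proj h1' h2' hshift]
            simp [pvLoopB, hs, hf]
          · rw [if_neg hs]
            rw [ih (i + 1) stk' (seq ++ [s]) (proj ++ ['.']) h1' h2' hshift]
            simp [pvLoopB, hs, hf]
        · have hnm : i ∉ pvTcOf ((f, i) :: stk') := by
            rw [pvTcOf_cons, if_neg hf, List.append_nil]; exact hnm'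
          rw [if_neg hnm, if_neg hnm, pvTcOf_cons, if_neg hf, List.append_nil]
          by_cases hs : s = '-'
          · rw [if_pos hs, if_neg (by decide)]
            rw [ih (i + 1) stk' seq proj h1' h2' hshift]
            simp [pvLoopB, hs, hf]
          · rw [if_neg hs]
            rw [ih (i + 1) stk' (seq ++ [s]) (proj ++ [')']) h1' h2' hshift]
            simp [pvLoopB, hs, hf]
    · by_cases hb2 : b = '('
      · subst hb2
        have hnm : i ∉ pvTcOf stk := pvTcOf_not_mem (fun d hd => by
          have hc := h1 d hd
          simp only [List.map_cons, pvClosePos, reduceIte] at hc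
          have := pvClosePos_ge hc; omega)
        obtain ⟨cl, hcl, hfind⟩ := he 0 (by simp) (by simp)
        have heq0 : (i + ((0 : Nat) : Int) + 1) = i + 1 := by push_cast; ring
        rw [heq0] at hcl hfind
        simp only [List.map_cons, List.drop_succ_cons, List.drop_zero] at hcl
        have h2' : pvWf (t.map Prod.snd) (stk.length + 1) = true := by
          simpa [pvWf] using h2
        have h1'' : ∀ (fl : Bool) (d : Nat) (hd : d < ((fl, cl) :: stk).length),
            pvClosePos (t.map Prod.snd) (i + 1) d = some (((fl, cl) :: stk)[d]).2 := by
          intro fl d hd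
          cases d with
          | zero => simpa using hcl
          | succ e =>
            have := h1 e (by simpa using hd)
            simp only [List.map_cons, pvClosePos, reduceIte] at this
            simpa using this
        rw [if_neg hnm, if_neg hnm]
        by_cases hs : s = '-'
        · rw [if_pos hs, if_pos rfl]
          simp only [hfind]
          have hc1 : cl + 1 - 1 = cl := by ring
          rw [hc1]
          have htc : pvTcOf stk ++ [cl] = pvTcOf ((true, cl) :: stk) := by
            rw [pvTcOf_cons]; simp
          rw [htc, ih (i + 1) ((true, cl) :: stk) seq proj (h1'' true) (by simpa using h2') hshift]
          simp [pvLoopB, hs]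
        · rw [if_neg hs]
          have htc : pvTcOf stk = pvTcOf ((false, cl) :: stk) := by
            rw [pvTcOf_cons]; simp
          rw [htc, ih (i + 1) ((false, cl) :: stk) (seq ++ [s]) (proj ++ ['('])
            (h1'' false) (by simpa using h2') hshift]
          simp [pvLoopB, hs]
      · have hnm : i ∉ pvTcOf stk := pvTcOf_not_mem (fun d hd => by
          have hc := h1 d hd
          simp only [List.map_cons, pvClosePos, if_neg hb, if_neg hb2] at hc
          have := pvClosePos_ge hc; omega)
        have h1' : ∀ (d : Nat) (hd : d < stk.length),
            pvClosePos (t.map Prod.snd) (i + 1) d = some stk[d].2 := by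
          intro d hd
          have := h1 d hd
          simpa [pvClosePos, hb, hb2] using this
        have h2' : pvWf (t.map Prod.snd) stk.length = true := by
          simpa [pvWf, hb, hb2] using h2
        rw [if_neg hnm, if_neg hnm]
        by_cases hs : s = '-'
        · rw [if_pos hs, if_neg hb2]
          rw [ih (i + 1) stk seq proj h1' h2' hshift]
          simp [pvLoopB, hs, hb, hb2]
        · rw [if_neg hs]
          rw [ih (i + 1) stk (seq ++ [s]) (proj ++ [b]) h1' h2' hshift]
          simp [pvLoopB, hs, hb, hb2]

theorem pvWf_iff_counts (bs : List Char) (d : Nat) :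
    pvWf bs d = true ↔
      (d + bs.count '(' = bs.count ')' ∧
       ∀ n : Nat, (bs.take n).count ')' ≤ d + (bs.take n).count '(') := by
  induction bs generalizing d with
  | nil => simp [pvWf]
  | cons c t ih =>
    by_cases h1 : c = ')'
    · subst h1
      cases d with
      | zero =>
        simp only [pvWf, reduceIte]
        constructor
        · intro h; simp at h
        · rintro ⟨htot, hpre⟩
          have hp1 := hpre 1
          simp [List.count_cons] at hp1
      | succ e =>
        simp only [pvWf, reduceIte]
        rw [ih e]
        constructor
        · rintro ⟨htot, hpre⟩
          refine ⟨by simp [List.count_cons]; omega, ?_⟩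
          intro n
          cases n with
          | zero => simp
          | succ m =>
            have := hpre m
            simp only [List.take_succ_cons, List.count_cons]
            simp
            omega
        · rintro ⟨htot, hpre⟩
          refine ⟨by simp [List.count_cons] at htot; omega, ?_⟩
          intro n
          have := hpre (n + 1)
          simp only [List.take_succ_cons, List.count_cons] at this
          simp at this
          omega
    · by_cases h2 : c = '('
      · subst h2
        simp only [pvWf, Char.reduceEq, reduceIte]
        rw [ih (d + 1)]
        constructor
        · rintro ⟨htot, hpre⟩
          refine ⟨by simp [List.count_cons]; omega, ?_⟩
          intro n
          cases n with
          | zero => simp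
          | succ m =>
            have := hpre m
            simp only [List.take_succ_cons, List.count_cons]
            simp
            omega
        · rintro ⟨htot, hpre⟩
          refine ⟨by simp [List.count_cons] at htot; omega, ?_⟩
          intro n
          have := hpre (n + 1)
          simp only [List.take_succ_cons, List.count_cons] at this
          simp at this
          omega
      · simp only [pvWf, if_neg h1, if_neg h2]
        rw [ih d]
        constructor
        · rintro ⟨htot, hpre⟩
          refine ⟨by simp [List.count_cons, h1, h2]; omega, ?_⟩
          intro n
          cases n with
          | zero => simp
          | succ m =>
            have := hpre m
            simp only [List.take_succ_cons, List.count_cons]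
            simp [h1, h2]
            omega
        · rintro ⟨htot, hpre⟩
          refine ⟨by simp [List.count_cons, h1, h2] at htot; omega, ?_⟩
          intro n
          have := hpre (n + 1)
          simp only [List.take_succ_cons, List.count_cons] at this
          simp [h1, h2] at this
          omega

-- ===== VERDICT (by name: the statement is the Claim_ definition above) =====
theorem rna_structure_projection_spec : Claim_equal_rna_structure_projection := by
  intro a b _ hpre
  obtain ⟨hlen, htot, hpre2⟩ := hpre
  unfold Spec_rna_structure_projection
  have hwf : pvWf b.toList 0 = true := by
    rw [pvWf_iff_counts]
    refine ⟨by simpa using htot, ?_⟩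
    intro n
    by_cases hn : n ≤ b.toList.length
    · have := hpre2 n (List.mem_range.2 (by omega))
      omega
    · rw [List.take_of_length_le (by omega)]
      omega
  have hzip_snd : (a.toList.zip b.toList).map Prod.snd = b.toList :=
    List.map_snd_zip (by omega)
  have hzip_len : (a.toList.zip b.toList).length = a.toList.length := by
    rw [List.length_zip]; omega
  have hpl : (pvParseLoop (PySem.List.enumerate b.toList) [] []).2 = pvRunPairs b.toList 0 [] := by
    simpa using pvParseLoop_pairs b.toList 0 [] []
  have hedges : ∀ (k : Nat) (hk : k < (a.toList.zip b.toList).length),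
      (((a.toList.zip b.toList)[k]'hk).2 = '(') →
      ∃ cl, pvClosePos (((a.toList.zip b.toList).map Prod.snd).drop (k + 1)) ((0 : Int) + k + 1) 0 = some cl ∧
        (PySem.List.sorted (pvRunPairs b.toList 0 []) (fun x => x.1) false).find?
          (fun e => decide (e.1 = (0 : Int) + k + 1)) = some ((0 : Int) + k + 1, cl + 1) := by
    intro k hk hck
    have hkb : k < b.toList.length := by omega
    have hbk : b.toList[k] = '(' := by
      rw [List.getElem_zip] at hck
      exact hck
    obtain ⟨cl, hcl, hmem⟩ := pvOpen_pair (stack := []) (0 : Int) hwf hkb hbk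
    refine ⟨cl, by rw [hzip_snd]; exact hcl, ?_⟩
    apply pvFind?_unique
    · rw [PySem.List.mem_sorted]
      exact hmem
    · simp
    · intro x hx hpx
      rw [PySem.List.mem_sorted] at hx
      refine pvRunPairs_uniq (by simp) (by simp) x hx _ hmem ?_
      simpa using hpx
  have hA := pvA_eq_loopB
      (edges := PySem.List.sorted (pvRunPairs b.toList 0 []) (fun x => x.1) false)
      (t := a.toList.zip b.toList) (i := 0) (stk := []) (seq := []) (proj := [])
      (by intro d hd; simp at hd) (by rw [hzip_snd]; exact hwf) hedges
  have hB := pvB_eq_loopB (a.toList.zip b.toList) 0 [] PySem.Set.empty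
      (by intro j hj; simp [PySem.Set.empty] at hj)
  have hseq : List.map Prod.fst (List.filter (fun p => decide (p.1 ≠ '-')) (a.toList.zip b.toList))
      = a.toList.filter (fun s => decide (s ≠ '-')) := by
    conv_rhs => rw [← List.map_fst_zip (l₁ := a.toList) (l₂ := b.toList) (by omega)]
    rw [List.filter_map]
    rfl
  simp only [show pvTcOf [] = [] from rfl] at hA
  simp only [rna_structure_projection, rna_structure_projection_alt, parse_rna_structure, hpl]
  rw [hA, hB, hseq]
  simp
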